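-- pv_equiv track=rewrite | github.com/deankiwi/crossword-ai | src/crossword_generator.py | input_to_board
-- ===== SOURCE A (Python) =====
-- from typing import List, Mapping
--
-- def input_to_board(text: str) -> List[List[str]]:
--     board = []
--     # TODO throw error is board isn't of some size
--
--     for letters in text.split("\n"):
--         row = []
--         for char in letters:
--             if char not in ["x", "X", "o", "O"]:
--                 raise ValueError(
--                     "Invalid input type, use only 'x', 'o', and newlines ('\\n')"
--                 )
--             row.append(char.lower())
--         board.append(row)
--
--     return board
-- ===== SOURCE B (Python) =====
-- from typing import List
--
--
-- def input_to_board(text: str) -> List[List[str]]: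
--     lower = {"x": "x", "X": "x", "o": "o", "O": "o"}
--     board: List[List[str]] = [[]]
--     for char in text:
--         if char == "\n":
--             board.append([])
--         else:
--             low = lower.get(char)
--             if low is None:
--                 raise ValueError(
--                     "Invalid input type, use only 'x', 'o', and newlines ('\\n')"
--                 )
--             board[-1].append(low)
--     return board
-- ===== Notes on version B (the rewrite author's own statement) =====
-- stated objective: alternative
-- what changed: Replaced A's split-into-lines plus nested per-line/per-char loops with a single flat scan over the whole text that never splits: a newline starts a new row, other chars are lowercased via a translation dict and appended to the current (last) row.
import Mathlib
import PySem

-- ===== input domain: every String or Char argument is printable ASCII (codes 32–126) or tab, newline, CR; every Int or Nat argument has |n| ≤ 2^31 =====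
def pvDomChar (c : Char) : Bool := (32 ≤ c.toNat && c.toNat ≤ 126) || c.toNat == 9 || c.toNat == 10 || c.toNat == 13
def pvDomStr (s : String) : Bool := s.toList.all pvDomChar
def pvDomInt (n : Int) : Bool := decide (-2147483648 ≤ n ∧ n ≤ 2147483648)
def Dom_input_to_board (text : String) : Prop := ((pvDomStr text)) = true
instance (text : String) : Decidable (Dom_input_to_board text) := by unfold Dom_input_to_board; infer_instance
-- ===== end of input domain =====

-- B replaces A's split-into-lines + nested per-line/per-char loops with ONE flat scan over
-- the text: a newline starts a new row, other chars are lowercased via a translation dict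
-- and appended to the current (last) row; objective: alternative (same behaviour, no split).
-- Both raise the same ValueError on invalid chars (outside Pre_).

-- ===== PORT A =====
-- A: for each line of text.split("\n"), per-char loop appending char.lower() to a row,
-- raising ValueError on a char not in ["x","X","o","O"] (Pre_ excludes such inputs;
-- the port skips the char there, which Pre_ makes unreachable).
def input_to_board (text : String) : List (List String) :=
  (PySem.Chars.splitOn text.toList ['\n']).foldl
    (fun board letters =>
      board ++ [letters.foldl
        (fun row ch =>
          if ch ∈ ['x', 'X', 'o', 'O'] then
            row ++ [String.ofList [PySem.Chars.lowerChar ch]]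
          else
            row)  -- Python: raise ValueError (excluded by Pre_)
        []])
    []

-- ===== PORT B =====
-- Source B's dict literal lower = {"x":"x","X":"x","o":"o","O":"o"}
def pvLowerTable : PySem.Dict Char String :=
  PySem.Dict.mk [('x', "x"), ('X', "x"), ('o', "o"), ('O', "o")]

-- board[-1].append(low): append to the last row of a nonempty board
def pvPushLast : List (List String) → String → List (List String)
  | [], _ => []          -- unreachable: the board starts as [[]] and never shrinks
  | [r], s => [r ++ [s]]
  | r :: rs, s => r :: pvPushLast rs s

-- B: one flat scan over the text, starting from board = [[]].
def input_to_board_alt (text : String) : List (List String) :=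
  text.toList.foldl
    (fun board ch =>
      if ch = '\n' then board ++ [[]]
      else
        match pvLowerTable.get? ch with
        | some low => pvPushLast board low
        | none => board)  -- Python: raise ValueError (excluded by Pre_)
    [[]]

-- ===== PRECONDITION & SPEC =====
-- Pre_ excludes exactly the inputs on which A raises ValueError (a char other than
-- 'x','X','o','O' or newline); B raises the identical ValueError there.
def Pre_input_to_board (text : String) : Prop :=
  (text.toList.all (fun c => c ∈ (['x', 'X', 'o', 'O', '\n'] : List Char))) = true
instance (text : String) : Decidable (Pre_input_to_board text) := by
  unfold Pre_input_to_board; infer_instance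

def pvWitness_input_to_board : String := "xO\nox"

def Spec_input_to_board (text : String) (out : List (List String)) : Prop :=
  out = input_to_board_alt text
instance (text : String) (out : List (List String)) : Decidable (Spec_input_to_board text out) := by
  unfold Spec_input_to_board; infer_instance

-- ===== CLAIM (what is proved, stated in full; the proofs are below) =====
def Claim_equal_input_to_board : Prop :=
  ∀ (text : String), Dom_input_to_board text → Pre_input_to_board text →
    Spec_input_to_board text (input_to_board text)

-- ===== LEMMAS AND PROOFS =====

-- Reference splitter: the standard cons-recurrence for splitting on '\n'.
def pvSplit : List Char → List (List Char)
  | [] => [[]]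
  | c :: rest =>
    if c = '\n' then [] :: pvSplit rest
    else
      match pvSplit rest with
      | [] => [[c]]      -- unreachable: pvSplit is never []
      | h :: t => (c :: h) :: t

-- prepend r onto the first piece
def pvCombine {α : Type} (r : List α) : List (List α) → List (List α)
  | [] => [r]
  | h :: t => (r ++ h) :: t

lemma pvSplit_ne_nil (l : List Char) : pvSplit l ≠ [] := by
  cases l with
  | nil => simp [pvSplit]
  | cons c rest =>
    simp only [pvSplit]
    split_ifs
    · simp
    · cases pvSplit rest <;> simp

lemma pvCombine_nil {α : Type} (m : List (List α)) (hm : m ≠ []) : pvCombine [] m = m := by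
  cases m with
  | nil => exact absurd rfl hm
  | cons h t => simp [pvCombine]

-- splitOn.go on separator '\n' computes acc.reverse ++ pvCombine cur.reverse (pvSplit l)
lemma go_eq_pvSplit (fuel : Nat) (l cur : List Char) (acc : List (List Char))
    (hf : l.length < fuel) :
    PySem.Chars.splitOn.go ['\n'] fuel l cur acc =
      acc.reverse ++ pvCombine cur.reverse (pvSplit l) := by
  induction fuel generalizing l cur acc with
  | zero => omega
  | succ fuel ih =>
    cases l with
    | nil =>
      simp [PySem.Chars.splitOn.go, pvSplit, pvCombine]
    | cons c rest =>
      simp only [PySem.Chars.splitOn.go]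
      by_cases hc : c = '\n'
      · subst hc
        have hpre : List.isPrefixOf ['\n'] ('\n' :: rest) = true := by
          simp [List.isPrefixOf]
        rw [if_pos hpre]
        have := ih rest [] (cur.reverse :: acc) (by simpa using hf)
        simp only [List.length_cons, List.length_nil, List.drop_succ_cons, List.drop_zero] at this ⊢
        rw [this, List.reverse_nil, pvCombine_nil _ (pvSplit_ne_nil rest)]
        simp [pvSplit, pvCombine]
      · have hne : ('\n' == c) = false := beq_eq_false_iff_ne.mpr (fun h => hc h.symm)
        have hpre : List.isPrefixOf ['\n'] (c :: rest) = false := by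
          simp [List.isPrefixOf, hne]
        rw [if_neg (by simp [hpre])]
        rw [ih rest (c :: cur) acc (by simpa using hf)]
        simp only [pvSplit, if_neg hc, List.reverse_cons]
        rcases hsp : pvSplit rest with _ | ⟨h, t⟩
        · exact absurd hsp (pvSplit_ne_nil rest)
        · simp [pvCombine]

lemma splitOn_eq_pvSplit (cs : List Char) :
    PySem.Chars.splitOn cs ['\n'] = pvSplit cs := by
  unfold PySem.Chars.splitOn
  rw [go_eq_pvSplit (cs.length + 1) cs [] [] (by omega)]
  simp [pvCombine_nil _ (pvSplit_ne_nil cs)]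

-- pieces of a valid text contain only the four board chars
lemma pvSplit_pieces_valid (cs : List Char)
    (h : ∀ c ∈ cs, c ∈ (['x', 'X', 'o', 'O', '\n'] : List Char)) :
    ∀ p ∈ pvSplit cs, ∀ c ∈ p, c ∈ (['x', 'X', 'o', 'O'] : List Char) := by
  induction cs with
  | nil => simp [pvSplit]
  | cons c rest ih =>
    have hrest := ih (fun d hd => h d (List.mem_cons_of_mem _ hd))
    have hc := h c List.mem_cons_self
    simp only [pvSplit]
    by_cases hcn : c = '\n'
    · rw [if_pos hcn]
      intro p hp
      rcases List.mem_cons.mp hp with rfl | hp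
      · simp
      · exact hrest p hp
    · rw [if_neg hcn]
      rcases hsp : pvSplit rest with _ | ⟨hpc, t⟩
      · exact absurd hsp (pvSplit_ne_nil rest)
      · intro p hp d hd
        rcases List.mem_cons.mp hp with rfl | hp
        · rcases List.mem_cons.mp hd with rfl | hd
          · simpa [hcn] using hc
          · exact hrest hpc (by rw [hsp]; exact List.mem_cons_self) d hd
        · exact hrest p (by rw [hsp]; exact List.mem_cons_of_mem _ hp) d hd

-- A fold that appends one image per element is a map (generalised accumulator).
lemma foldl_append_map {α β : Type} (g : α → β) :
    ∀ (xs : List α) (acc : List β),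
      xs.foldl (fun b x => b ++ [g x]) acc = acc ++ xs.map g := by
  intro xs
  induction xs with
  | nil => simp
  | cons x xs ih => intro acc; simp [List.foldl_cons, ih]

-- A's inner per-char loop equals a map when every char passes the check.
lemma inner_foldl_eq_map (line : List Char)
    (h : ∀ c ∈ line, c ∈ (['x', 'X', 'o', 'O'] : List Char)) :
    line.foldl
      (fun row ch =>
        if ch ∈ ['x', 'X', 'o', 'O'] then
          row ++ [String.ofList [PySem.Chars.lowerChar ch]]
        else row) [] =
    line.map (fun ch => String.ofList [PySem.Chars.lowerChar ch]) := by
  have key : ∀ (l : List Char) (acc : List String),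
      (∀ c ∈ l, c ∈ (['x', 'X', 'o', 'O'] : List Char)) →
      l.foldl
        (fun row ch =>
          if ch ∈ ['x', 'X', 'o', 'O'] then
            row ++ [String.ofList [PySem.Chars.lowerChar ch]]
          else row) acc =
      acc ++ l.map (fun ch => String.ofList [PySem.Chars.lowerChar ch]) := by
    intro l
    induction l with
    | nil => simp
    | cons c l ih =>
      intro acc hv
      have hc := hv c List.mem_cons_self
      simp only [List.foldl_cons, if_pos hc, List.map_cons]
      rw [ih _ (fun d hd => hv d (List.mem_cons_of_mem _ hd))]
      simp
  simpa using key line [] h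

-- A as a map over pvSplit
lemma portA_eq_map (text : String)
    (h : ∀ c ∈ text.toList, c ∈ (['x', 'X', 'o', 'O', '\n'] : List Char)) :
    input_to_board text =
      (pvSplit text.toList).map
        (fun p => p.map (fun ch => String.ofList [PySem.Chars.lowerChar ch])) := by
  unfold input_to_board
  rw [splitOn_eq_pvSplit, foldl_append_map, List.nil_append]
  exact List.map_congr_left fun p hp =>
    inner_foldl_eq_map p (pvSplit_pieces_valid text.toList h p hp)

-- pushLast appends to the last row
lemma pvPushLast_append (bs : List (List String)) (r : List String) (s : String) :
    pvPushLast (bs ++ [r]) s = bs ++ [r ++ [s]] := by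
  induction bs with
  | nil => simp [pvPushLast]
  | cons b bs ih =>
    cases bs with
    | nil => simp [pvPushLast]
    | cons b' bs' => simpa [pvPushLast] using ih

-- B's flat scan computes bs ++ pvCombine r (map over pvSplit), for any prefix board
lemma portB_fold_eq (cs : List Char)
    (h : ∀ c ∈ cs, c ∈ (['x', 'X', 'o', 'O', '\n'] : List Char)) :
    ∀ (bs : List (List String)) (r : List String),
    cs.foldl
      (fun board ch =>
        if ch = '\n' then board ++ [[]]
        else
          match pvLowerTable.get? ch with
          | some low => pvPushLast board low
          | none => board)
      (bs ++ [r]) =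
    bs ++ pvCombine r
      ((pvSplit cs).map (fun p => p.map (fun ch => String.ofList [PySem.Chars.lowerChar ch]))) := by
  induction cs with
  | nil => intro bs r; simp [pvSplit, pvCombine]
  | cons c rest ih =>
    intro bs r
    have hrest := ih (fun d hd => h d (List.mem_cons_of_mem _ hd))
    have hc := h c List.mem_cons_self
    simp only [List.foldl_cons]
    by_cases hcn : c = '\n'
    · subst hcn
      rw [if_pos rfl]
      have : bs ++ [r] ++ [([] : List String)] = (bs ++ [r]) ++ [[]] := rfl
      rw [this, hrest (bs ++ [r]) []]
      rcases hsp : pvSplit rest with _ | ⟨hpc, t⟩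
      · exact absurd hsp (pvSplit_ne_nil rest)
      · simp [pvSplit, pvCombine, hsp]
    · rw [if_neg hcn]
      -- c is one of the four board chars; the table lookup gives the lowered letter
      have hc4 : c ∈ (['x', 'X', 'o', 'O'] : List Char) := by
        simp only [List.mem_cons, List.not_mem_nil, or_false] at hc
        rcases hc with rfl | rfl | rfl | rfl | rfl
        · simp
        · simp
        · simp
        · simp
        · exact absurd rfl hcn
      have htab : pvLowerTable.get? c =
          some (String.ofList [PySem.Chars.lowerChar c]) := by
        simp only [List.mem_cons, List.not_mem_nil, or_false] at hc4
        rcases hc4 with rfl | rfl | rfl | rfl <;> decide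
      rw [htab]
      simp only []
      rw [pvPushLast_append, hrest bs (r ++ [String.ofList [PySem.Chars.lowerChar c]])]
      rcases hsp : pvSplit rest with _ | ⟨hpc, t⟩
      · exact absurd hsp (pvSplit_ne_nil rest)
      · simp [pvSplit, hcn, hsp, pvCombine]

-- ===== VERDICT (by name: the statement is the Claim_ definition above) =====
theorem input_to_board_spec : Claim_equal_input_to_board := by
  intro text _ hpre
  have hpre' : ∀ c ∈ text.toList, c ∈ (['x', 'X', 'o', 'O', '\n'] : List Char) := by
    simpa only [Pre_input_to_board, List.all_eq_true, decide_eq_true_eq] using hpre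
  unfold Spec_input_to_board input_to_board_alt
  have hB := portB_fold_eq text.toList hpre' [] []
  simp only [List.nil_append] at hB
  rw [hB]
  rw [portA_eq_map text hpre']
  rcases hsp : pvSplit text.toList with _ | ⟨h, t⟩
  · exact absurd hsp (pvSplit_ne_nil text.toList)
  · simp [pvCombine]
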